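-- pv_equiv track=rewrite | github.com/elifbkmz/project-dolly | pages/review.py | _next_pending_key
-- ===== SOURCE A (Python) =====
-- from typing import Optional
--
-- def _next_pending_key(
--     filtered_keys: list[str],
--     current_key: str,
--     decisions: dict,
-- ) -> Optional[str]:
--     """
--     Return the next key after current_key in filtered_keys that has no decision yet.
--
--     `decisions` is session.decisions — a dict keyed by account_key.
--     Returns None if no pending account exists in filtered_keys.
--
--     If current_key is not in filtered_keys (e.g. it was filtered out), returns
--     the first pending key in filtered_keys, or None if all are decided.
--     """
--     if current_key not in filtered_keys:
--         # Selected account is no longer visible — return the first pending key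
--         return next((k for k in filtered_keys if k not in decisions), None)
--
--     found_current = False
--     for key in filtered_keys:
--         if key == current_key:
--             found_current = True
--             continue
--         if found_current and key not in decisions:
--             return key
--     # Wrap-search from beginning if not found after current
--     for key in filtered_keys:
--         if key == current_key:
--             break
--         if key not in decisions:
--             return key
--     return None
-- ===== SOURCE B (Python) =====
-- from typing import Optional
--
-- def _next_pending_key(
--     filtered_keys: list[str],
--     current_key: str,
--     decisions: dict,
-- ) -> Optional[str]:
--     n = len(filtered_keys)
--     pending = [(j, k) for j, k in enumerate(filtered_keys)
--                if k not in decisions and k != current_key]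
--     if not pending:
--         return None
--     i = filtered_keys.index(current_key) if current_key in filtered_keys else -1
--     return min(pending, key=lambda p: (p[0] - i - 1) % n)[1]
-- ===== Notes on version B (the rewrite author's own statement) =====
-- stated objective: alternative
-- what changed: Replaces A's sequential wrap-around scan (flag pass plus wrap pass) with an arithmetic argmin: collect all pending (index, key) pairs in one enumerate pass, then return the key whose circular distance (j - i - 1) % n from the current index is minimal.
import Mathlib
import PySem

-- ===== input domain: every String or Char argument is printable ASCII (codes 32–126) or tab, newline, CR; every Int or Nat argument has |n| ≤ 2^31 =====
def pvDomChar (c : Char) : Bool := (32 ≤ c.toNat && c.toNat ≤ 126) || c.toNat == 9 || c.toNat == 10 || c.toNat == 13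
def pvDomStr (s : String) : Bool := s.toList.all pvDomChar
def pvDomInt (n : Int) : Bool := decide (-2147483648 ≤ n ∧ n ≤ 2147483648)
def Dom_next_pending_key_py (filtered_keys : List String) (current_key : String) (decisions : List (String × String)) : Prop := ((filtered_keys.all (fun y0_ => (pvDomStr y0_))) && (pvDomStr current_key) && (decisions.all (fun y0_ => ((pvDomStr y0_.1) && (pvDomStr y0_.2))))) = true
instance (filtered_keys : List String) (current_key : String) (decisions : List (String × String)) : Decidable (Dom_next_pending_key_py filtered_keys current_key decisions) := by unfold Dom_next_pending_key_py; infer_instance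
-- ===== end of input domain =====

-- B replaces A's sequential wrap-around scan with an arithmetic argmin: one enumerate
-- pass collects the pending (index, key) pairs, and the answer is the pair minimizing
-- the circular distance (j - i - 1) % n from the current index (objective: alternative).

-- ===== PORT A =====
-- `k not in decisions` (dict-key membership): true iff no pair in the assoc list has key k
def npkPending (decisions : List (String × String)) (k : String) : Bool :=
  !(decisions.any (fun p => p.1 == k))

-- first loop of A: found_current flag threaded through; `none` means the loop fell through
def npkLoop1 (current_key : String) (decisions : List (String × String)) :
    List String → Bool → Option String
  | [], _ => none
  | key :: rest, found =>
    if key == current_key then npkLoop1 current_key decisions rest true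
    else if found && npkPending decisions key then some key
    else npkLoop1 current_key decisions rest found

-- second (wrap) loop of A: break at current_key, else return first pending
def npkLoop2 (current_key : String) (decisions : List (String × String)) :
    List String → Option String
  | [] => none
  | key :: rest =>
    if key == current_key then none
    else if npkPending decisions key then some key
    else npkLoop2 current_key decisions rest

def next_pending_key_py (filtered_keys : List String) (current_key : String) (decisions : List (String × String)) : Option String :=
  if filtered_keys.contains current_key = false then
    filtered_keys.find? (fun k => npkPending decisions k)
  else
    match npkLoop1 current_key decisions filtered_keys false with
    | some k => some k
    | none => npkLoop2 current_key decisions filtered_keys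

-- ===== PORT B =====
-- pending = [(j, k) for j, k in enumerate(filtered_keys) if k not in decisions and k != current_key]
def npkPendingPairs (filtered_keys : List String) (current_key : String)
    (decisions : List (String × String)) : List (Int × String) :=
  (PySem.List.enumerate filtered_keys).filter
    (fun p => npkPending decisions p.2 && !(p.2 == current_key))

-- i = filtered_keys.index(current_key) if current_key in filtered_keys else -1
-- (.getD 0 is never used: index? is some exactly when contains holds)
def npkCurIndex (filtered_keys : List String) (current_key : String) : Int :=
  if filtered_keys.contains current_key
  then ((PySem.List.index? filtered_keys current_key).getD 0 : Nat) else -1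

def next_pending_key_py_alt (filtered_keys : List String) (current_key : String) (decisions : List (String × String)) : Option String :=
  if (npkPendingPairs filtered_keys current_key decisions).isEmpty then none
  else
    -- min(pending, key=lambda p: (p[0] - i - 1) % n)[1]
    (PySem.List.min? (npkPendingPairs filtered_keys current_key decisions)
      (fun p => PySem.Int.mod (p.1 - npkCurIndex filtered_keys current_key - 1)
        (filtered_keys.length : Int))).map (fun p => p.2)

-- ===== PRECONDITION & SPEC =====
def Spec_next_pending_key_py (filtered_keys : List String) (current_key : String) (decisions : List (String × String)) (out : Option String) : Prop := out = next_pending_key_py_alt filtered_keys current_key decisions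
instance (filtered_keys : List String) (current_key : String) (decisions : List (String × String)) (out : Option String) : Decidable (Spec_next_pending_key_py filtered_keys current_key decisions out) := by unfold Spec_next_pending_key_py; infer_instance

-- ===== CLAIM (what is proved, stated in full; the proofs are below) =====
def Claim_equal_next_pending_key_py : Prop := ∀ (filtered_keys : List String) (current_key : String) (decisions : List (String × String)), Dom_next_pending_key_py filtered_keys current_key decisions → Spec_next_pending_key_py filtered_keys current_key decisions (next_pending_key_py filtered_keys current_key decisions)

-- ===== LEMMAS AND PROOFS =====

-- A's first loop skips a ck-free prefix unchanged
theorem npkLoop1_skip (ck : String) (ds : List (String × String)) (l₁ l₂ : List String)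
    (h : ck ∉ l₁) : npkLoop1 ck ds (l₁ ++ l₂) false = npkLoop1 ck ds l₂ false := by
  induction l₁ with
  | nil => rfl
  | cons x xs ih =>
    have hx : x ≠ ck := fun he => h (he ▸ List.mem_cons_self)
    simp only [List.cons_append, npkLoop1, beq_iff_eq, if_neg hx, Bool.false_and,
      Bool.false_eq_true, if_neg (by simp : ¬False)]
    exact ih (fun hm => h (List.mem_cons_of_mem _ hm))

-- with the flag set, A's first loop is find? with the ≠ck ∧ pending predicate
theorem npkLoop1_found (ck : String) (ds : List (String × String)) (l : List String) :
    npkLoop1 ck ds l true = l.find? (fun k => !(k == ck) && npkPending ds k) := by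
  induction l with
  | nil => rfl
  | cons x xs ih =>
    by_cases hx : x = ck
    · subst hx
      simp [npkLoop1, List.find?, ih]
    · simp only [npkLoop1, Bool.true_and, List.find?,
        show (x == ck) = false by simpa using hx, Bool.not_false, Bool.true_and]
      by_cases hp : npkPending ds x = true
      · simp [hp]
      · simp [hp, ih]

-- A's wrap loop on a list whose first ck occurrence splits it
theorem npkLoop2_eq (ck : String) (ds : List (String × String)) (l₁ l₂ : List String)
    (h : ck ∉ l₁) : npkLoop2 ck ds (l₁ ++ ck :: l₂) = l₁.find? (fun k => npkPending ds k) := by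
  induction l₁ with
  | nil => simp [npkLoop2]
  | cons x xs ih =>
    have hx : x ≠ ck := fun he => h (he ▸ List.mem_cons_self)
    simp only [List.cons_append, npkLoop2, beq_iff_eq, if_neg hx, List.find?]
    by_cases hp : npkPending ds x = true
    · simp [hp]
    · simp [hp, ih (fun hm => h (List.mem_cons_of_mem _ hm))]

-- the ≠ck conjunct is vacuous on a ck-free list
theorem npkFind?_ne_congr (ck : String) (p : String → Bool) (l : List String) (h : ck ∉ l) :
    l.find? (fun k => !(k == ck) && p k) = l.find? p := by
  induction l with
  | nil => rfl
  | cons x xs ih =>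
    have hx : x ≠ ck := fun he => h (he ▸ List.mem_cons_self)
    simp only [List.find?, show (x == ck) = false by simpa using hx, Bool.not_false,
      Bool.true_and]
    cases hp : p x
    · exact ih (fun hm => h (List.mem_cons_of_mem _ hm))
    · rfl

-- find? is the head of the filtered list
theorem npkFind?_eq_head?_filter {α : Type} (p : α → Bool) (l : List α) :
    l.find? p = (l.filter p).head? := by
  induction l with
  | nil => rfl
  | cons x xs ih =>
    by_cases hp : p x = true
    · rw [List.find?_cons_of_pos hp, List.filter_cons_of_pos hp]; rfl
    · rw [List.find?_cons_of_neg hp, List.filter_cons_of_neg hp]; exact ih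

-- Python's min returns the unique element strictly below all others
theorem npkMin?_unique {α κ : Type} [LinearOrder κ] (key : α → κ) (L : List α) (m : α)
    (hm : m ∈ L) (hlt : ∀ y ∈ L, y = m ∨ key m < key y) :
    PySem.List.min? L key = some m := by
  cases h : PySem.List.min? L key with
  | none =>
    exact absurd ((PySem.List.min?_eq_none_iff L key).mp h ▸ hm) (List.not_mem_nil)
  | some x =>
    have hxL : x ∈ L := PySem.List.min?_mem h
    have hle : key x ≤ key m := PySem.List.min?_isMin h m hm
    rcases hlt x hxL with rfl | hk
    · rfl
    · exact absurd hle (not_le.mpr hk)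

-- snd-projection of a filtered enumerate is the filtered list
theorem npkMapSnd (q : String → Bool) (xs : List String) (s : Int) :
    ((PySem.List.enumerate xs s).filter (fun p => q p.2)).map (fun p => p.2) = xs.filter q := by
  have h := List.filter_map (f := fun p : Int × String => p.2) (p := q)
    (l := PySem.List.enumerate xs s)
  rw [PySem.List.map_snd_enumerate] at h
  exact h.symm

theorem npkMod_small {x n : Int} (h0 : 0 ≤ x) (h1 : x < n) : PySem.Int.mod x n = x := by
  rw [PySem.Int.mod_eq_emod_of_pos (by omega)]
  exact Int.emod_eq_of_lt h0 h1

theorem npkMod_neg {x n : Int} (h0 : -n ≤ x) (h1 : x < 0) : PySem.Int.mod x n = x + n := by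
  rw [PySem.Int.mod_eq_emod_of_pos (by omega)]
  have h2 : x % n = (x + n) % n := by
    conv_rhs => rw [show x + n = x + n * 1 by ring, Int.add_mul_emod_self_left]
  rw [h2]
  exact Int.emod_eq_of_lt (by omega) (by omega)

-- index bounds of filtered enumerate members
theorem npkBounds {xs : List String} {s : Int} {p : String → Bool} {y : Int × String}
    (hy : y ∈ (PySem.List.enumerate xs s).filter (fun q => p q.2)) :
    s ≤ y.1 ∧ y.1 < s + xs.length := by
  obtain ⟨k, hk, rfl⟩ := (PySem.List.mem_enumerate_iff xs s y).mp (List.mem_filter.mp hy).1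
  constructor <;> [omega; (push_cast; omega)]

-- a filtered enumerate is strictly increasing in the index
theorem npkPairwiseFst (xs : List String) (s : Int) (p : String → Bool) :
    List.Pairwise (fun a b => a.1 < b.1)
      ((PySem.List.enumerate xs s).filter (fun q => p q.2)) :=
  (PySem.List.pairwise_lt_enumerate xs s).filter _

-- ===== VERDICT (by name: the statement is the Claim_ definition above) =====
-- ===== VERDICT (the statement is the Claim_ definition above) =====
theorem next_pending_key_py_spec : Claim_equal_next_pending_key_py := by
  intro fk ck ds _
  show next_pending_key_py fk ck ds = next_pending_key_py_alt fk ck ds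
  unfold next_pending_key_py next_pending_key_py_alt
  cases hc : fk.contains ck with
  | false =>
    -- current_key not in filtered_keys: A is find? pending; B's argmin key is the index itself
    have hck : ck ∉ fk := by simpa using hc
    have hcur : npkCurIndex fk ck = -1 := by unfold npkCurIndex; rw [hc]; rfl
    rw [if_pos rfl, hcur]
    set pend := npkPendingPairs fk ck ds with hpend
    have hmap : pend.map (fun p => p.2) = fk.filter (fun k => npkPending ds k) := by
      rw [hpend]
      unfold npkPendingPairs
      rw [npkMapSnd (fun k => npkPending ds k && !(k == ck)) fk 0]
      refine List.filter_congr (fun k hk => ?_)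
      have hkne : (k == ck) = false := by
        simp only [beq_eq_false_iff_ne]; exact fun he => hck (he ▸ hk)
      simp [hkne]
    have hfind : fk.find? (fun k => npkPending ds k) = (pend.map (fun p => p.2)).head? := by
      rw [hmap, npkFind?_eq_head?_filter]
    rw [hfind]
    cases hpc : pend with
    | nil => simp
    | cons h t =>
      rw [if_neg (by simp)]
      -- the distance key reduces to the index on members, which is strictly increasing
      have hpair : List.Pairwise
          (fun a b => PySem.Int.mod (a.1 - (-1) - 1) (fk.length : Int) <
            PySem.Int.mod (b.1 - (-1) - 1) (fk.length : Int)) pend := by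
        rw [hpend]
        unfold npkPendingPairs
        refine (npkPairwiseFst fk 0 (fun k => npkPending ds k && !(k == ck))).imp_of_mem
          (fun {a b} ha hb hab => ?_)
        have hba := npkBounds (p := fun k => npkPending ds k && !(k == ck)) ha
        have hbb := npkBounds (p := fun k => npkPending ds k && !(k == ck)) hb
        rw [show a.1 - (-1) - 1 = a.1 by ring, show b.1 - (-1) - 1 = b.1 by ring,
          npkMod_small (by omega) (by omega), npkMod_small (by omega) (by omega)]
        exact hab
      have hmin : PySem.List.min? (h :: t)
          (fun p => PySem.Int.mod (p.1 - (-1) - 1) (fk.length : Int)) = some h := by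
        refine npkMin?_unique _ (h :: t) h List.mem_cons_self ?_
        intro y hy
        rw [hpc] at hpair
        rcases List.mem_cons.mp hy with rfl | hyt
        · exact Or.inl rfl
        · exact Or.inr ((List.pairwise_cons.mp hpair).1 y hyt)
      rw [hmin]
      rfl
  | true =>
    -- current_key in filtered_keys, split at its first occurrence
    have hmem : ck ∈ fk := by simpa using hc
    obtain ⟨i, hi⟩ := Option.isSome_iff_exists.mp
      ((PySem.List.index?_isSome_iff fk ck).mpr hmem)
    obtain ⟨pre, suf, hdec, hlen, hnot⟩ := (PySem.List.index?_eq_some_iff fk ck i).mp hi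
    have hcur : npkCurIndex fk ck = (i : Int) := by
      unfold npkCurIndex; rw [hc, hi]; rfl
    rw [if_neg (by simp), hcur]
    -- A's side: the two loops are find? over suf then pre with the ≠ck ∧ pending predicate
    have hA : (match npkLoop1 ck ds fk false with
        | some k => some k
        | none => npkLoop2 ck ds fk) =
        (suf ++ pre).find? (fun k => !(k == ck) && npkPending ds k) := by
      rw [hdec, npkLoop1_skip ck ds pre (ck :: suf) hnot,
        show npkLoop1 ck ds (ck :: suf) false = npkLoop1 ck ds suf true by simp [npkLoop1],
        npkLoop1_found, List.find?_append, npkLoop2_eq ck ds pre suf hnot,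
        ← npkFind?_ne_congr ck (fun k => npkPending ds k) pre hnot]
      cases suf.find? (fun k => !(k == ck) && npkPending ds k) <;> rfl
    rw [hA]
    -- B's side: pending splits around the dropped (i, ck) entry
    set pend := npkPendingPairs fk ck ds with hpend
    have hsplit : pend =
        (PySem.List.enumerate pre 0).filter (fun p => npkPending ds p.2 && !(p.2 == ck)) ++
        (PySem.List.enumerate suf ((i : Int) + 1)).filter
          (fun p => npkPending ds p.2 && !(p.2 == ck)) := by
      have hst : (0 : Int) + (pre.length : Int) = (i : Int) := by simp [hlen]
      rw [hpend]
      unfold npkPendingPairs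
      rw [hdec, PySem.List.enumerate_append, List.filter_append,
        PySem.List.enumerate_cons, hst]
      simp
    set M := (PySem.List.enumerate suf ((i : Int) + 1)).filter
        (fun p => npkPending ds p.2 && !(p.2 == ck)) ++
      (PySem.List.enumerate pre 0).filter (fun p => npkPending ds p.2 && !(p.2 == ck)) with hM
    have hperm : pend.Perm M := by rw [hsplit, hM]; exact List.perm_append_comm
    -- A's find? is the head of M's snd-projection
    have hAeq : (suf ++ pre).find? (fun k => !(k == ck) && npkPending ds k) =
        (M.map (fun p => p.2)).head? := by
      rw [show (fun k => !(k == ck) && npkPending ds k) =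
          (fun k => npkPending ds k && !(k == ck)) by funext k; exact Bool.and_comm _ _,
        npkFind?_eq_head?_filter, List.filter_append, hM, List.map_append,
        npkMapSnd (fun k => npkPending ds k && !(k == ck)) suf ((i : Int) + 1),
        npkMapSnd (fun k => npkPending ds k && !(k == ck)) pre 0]
    rw [hAeq]
    -- length facts
    have hlenfk : (fk.length : Int) = (pre.length : Int) + 1 + (suf.length : Int) := by
      rw [hdec]; push_cast [List.length_append, List.length_cons]; ring
    have hin : (i : Int) = (pre.length : Int) := by exact_mod_cast hlen.symm
    -- the circular-distance key on M's members
    have dist1 : ∀ y ∈ (PySem.List.enumerate suf ((i : Int) + 1)).filter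
        (fun p => npkPending ds p.2 && !(p.2 == ck)),
        PySem.Int.mod (y.1 - (i : Int) - 1) (fk.length : Int) = y.1 - (i : Int) - 1 := by
      intro y hy
      have hb := npkBounds (p := fun k => npkPending ds k && !(k == ck)) hy
      exact npkMod_small (by omega) (by omega)
    have dist2 : ∀ y ∈ (PySem.List.enumerate pre 0).filter
        (fun p => npkPending ds p.2 && !(p.2 == ck)),
        PySem.Int.mod (y.1 - (i : Int) - 1) (fk.length : Int) = y.1 - (i : Int) - 1 + (fk.length : Int) := by
      intro y hy
      have hb := npkBounds (p := fun k => npkPending ds k && !(k == ck)) hy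
      exact npkMod_neg (by omega) (by omega)
    have hpair : List.Pairwise
        (fun a b => PySem.Int.mod (a.1 - (i : Int) - 1) (fk.length : Int) <
          PySem.Int.mod (b.1 - (i : Int) - 1) (fk.length : Int)) M := by
      rw [hM, List.pairwise_append]
      refine ⟨(npkPairwiseFst suf ((i : Int) + 1)
          (fun k => npkPending ds k && !(k == ck))).imp_of_mem (fun {a b} ha hb hab => ?_),
        (npkPairwiseFst pre 0
          (fun k => npkPending ds k && !(k == ck))).imp_of_mem (fun {a b} ha hb hab => ?_),
        fun a ha b hb => ?_⟩
      · rw [dist1 a ha, dist1 b hb]; omega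
      · rw [dist2 a ha, dist2 b hb]; omega
      · have hba := npkBounds (p := fun k => npkPending ds k && !(k == ck)) ha
        have hbb := npkBounds (p := fun k => npkPending ds k && !(k == ck)) hb
        rw [dist1 a ha, dist2 b hb]; omega
    cases hMc : M with
    | nil =>
      have hpe : pend = [] := List.Perm.eq_nil (hMc ▸ hperm)
      rw [hpe]
      simp
    | cons h t =>
      have hnp : pend ≠ [] := by
        intro he
        rw [he, hMc] at hperm
        exact (List.cons_ne_nil h t) hperm.nil_eq.symm
      have hne : pend.isEmpty = false := by
        rw [Bool.eq_false_iff]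
        intro h'
        exact hnp (List.isEmpty_iff.mp h')
      rw [if_neg (by simp [hne])]
      have hmin : PySem.List.min? pend
          (fun p => PySem.Int.mod (p.1 - (i : Int) - 1) (fk.length : Int)) = some h := by
        refine npkMin?_unique _ pend h
          (hperm.mem_iff.mpr (by rw [hMc]; exact List.mem_cons_self)) ?_
        intro y hy
        have hyM := hperm.mem_iff.mp hy
        rw [hMc] at hyM hpair
        rcases List.mem_cons.mp hyM with rfl | hyt
        · exact Or.inl rfl
        · exact Or.inr ((List.pairwise_cons.mp hpair).1 y hyt)
      rw [hmin]
      rfl
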